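-- pv_equiv track=rewrite | github.com/xqms/clang-highlight | src/clang_highlight/map_stl.py | lex_params
-- ===== SOURCE A (Python) =====
-- def lex_params(params: str):
--     """
--     Stupid template parameter lexer
--
--     >>> lex_params("class T, std::some_concept<parameters> b> void func()")
--     (['class T', 'std::some_concept<parameters> b'], ' void func()')
--     """
--     ret = []
--     current_param = ""
--     level = 1
--
--     for idx, c in enumerate(params):
--         if level == 1:
--             if c == ">":
--                 if current_param != "":
--                     ret.append(current_param)
--                 end_idx = idx + 1
--                 break
--
--             if c == ",":
--                 if current_param != "":
--                     ret.append(current_param)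
--                 current_param = ""
--             else:
--                 current_param += c
--         else:
--             current_param += c
--
--         if c == "<":
--             level += 1
--         elif c == ">":
--             level -= 1
--
--     assert level == 1
--     return [p.strip() for p in ret], params[end_idx:]
-- ===== SOURCE B (Python) =====
-- def lex_params(params: str):
--     """Boundary-recording lexer: one pass records top-level comma indices and the
--     first top-level '>', then the parameters are sliced out between boundaries."""
--     level = 1
--     commas = []
--     end_idx = None
--     for idx, c in enumerate(params):
--         if level == 1:
--             if c == ">":
--                 end_idx = idx
--                 break
--             if c == ",":
--                 commas.append(idx)
--         if c == "<":
--             level += 1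
--         elif c == ">":
--             level -= 1
--     if end_idx is None:
--         raise ValueError("no top-level '>' in template parameter list")
--     starts = [0] + [i + 1 for i in commas]
--     ends = commas + [end_idx]
--     raws = [params[a:b] for a, b in zip(starts, ends)]
--     return [r.strip() for r in raws if r != ""], params[end_idx + 1:]
-- ===== Notes on version B (the rewrite author's own statement) =====
-- stated objective: alternative
-- what changed: Instead of accumulating each parameter character-by-character into a growing string, B does one pass that only records the indices of top-level commas and of the first top-level '>', then slices the raw parameter substrings out between those recorded boundaries; Pre_ excludes inputs with no top-level '>' where A raises (UnboundLocalError or AssertionError) and B raises ValueError.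
import Mathlib
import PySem

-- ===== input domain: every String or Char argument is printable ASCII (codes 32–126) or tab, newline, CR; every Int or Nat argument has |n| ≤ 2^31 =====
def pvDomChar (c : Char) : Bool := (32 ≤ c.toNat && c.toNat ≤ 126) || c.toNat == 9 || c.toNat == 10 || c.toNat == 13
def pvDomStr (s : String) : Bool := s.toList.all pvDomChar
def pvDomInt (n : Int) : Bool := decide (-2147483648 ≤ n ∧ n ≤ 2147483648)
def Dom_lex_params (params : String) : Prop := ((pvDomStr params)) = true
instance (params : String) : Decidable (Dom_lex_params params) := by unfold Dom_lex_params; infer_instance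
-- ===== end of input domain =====

-- B records boundary indices in one pass and slices the parameters out afterwards,
-- instead of A's character-by-character accumulation; same O(n) cost (objective: alternative).

-- ===== PORT A =====
-- Python enumerate(params) with Nat indices (all indices here are nonnegative).
def pvEnumFrom (k : Nat) : List Char → List (Nat × Char)
  | [] => []
  | c :: rest => (k, c) :: pvEnumFrom (k + 1) rest

-- A's loop; `current_param`/`ret` kept as List Char / List (List Char).
-- Returns none when the loop falls off the end: there `params[end_idx:]` raises
-- UnboundLocalError (or the assert fails), so Python A raises — excluded by Pre_.
def lexA_loop : List (Nat × Char) → List (List Char) → List Char → Int →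
    Option (List (List Char) × Nat)
  | [], _, _, _ => none
  | (idx, c) :: rest, ret, cur, level =>
    if level = 1 then
      if c = '>' then
        some ((if cur ≠ [] then ret ++ [cur] else ret), idx + 1)
      else
        let p := if c = ',' then ((if cur ≠ [] then ret ++ [cur] else ret), ([] : List Char))
                 else (ret, cur ++ [c])
        let level' := if c = '<' then level + 1 else if c = '>' then level - 1 else level
        lexA_loop rest p.1 p.2 level'
    else
      let cur' := cur ++ [c]
      let level' := if c = '<' then level + 1 else if c = '>' then level - 1 else level
      lexA_loop rest ret cur' level'

def lex_params (params : String) : List String × String :=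
  match lexA_loop (pvEnumFrom 0 params.toList) [] [] 1 with
  | some (ret, end_idx) =>
      (ret.map (fun p => String.ofList (PySem.Chars.strip p)),
       String.ofList (params.toList.drop end_idx))   -- params[end_idx:], 0 ≤ end_idx
  | none => ([], "")  -- Python A raises here; excluded by Pre_

-- ===== PORT B =====
-- B's loop: record top-level comma indices and the first top-level '>' index.
def lexB_loop : List (Nat × Char) → Int → List Nat → Option (List Nat × Nat)
  | [], _, _ => none
  | (idx, c) :: rest, level, commas =>
    if level = 1 ∧ c = '>' then some (commas, idx)
    else
      let commas' := if level = 1 ∧ c = ',' then commas ++ [idx] else commas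
      let level' := if c = '<' then level + 1 else if c = '>' then level - 1 else level
      lexB_loop rest level' commas'

-- params[a:b] with 0 ≤ a ≤ b ≤ len: exact as drop-then-take.
def pvSliceNat (cs : List Char) (a b : Nat) : List Char := (cs.drop a).take (b - a)

def lex_params_alt (params : String) : List String × String :=
  match lexB_loop (pvEnumFrom 0 params.toList) 1 [] with
  | none => ([], "")  -- Python B raises ValueError here; excluded by Pre_
  | some (commas, end_idx) =>
      let cs := params.toList
      let starts := 0 :: commas.map (· + 1)
      let ends := commas ++ [end_idx]
      let raws := List.zipWith (pvSliceNat cs) starts ends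
      ((raws.filter (· ≠ [])).map (fun r => String.ofList (PySem.Chars.strip r)),
       String.ofList (cs.drop (end_idx + 1)))

-- ===== PRECONDITION & SPEC =====
-- Pre_ excludes exactly the inputs with no top-level '>' (nesting counted by '<'/'>'),
-- on which Python A raises (UnboundLocalError, or AssertionError) and Python B raises ValueError.
def Pre_lex_params (params : String) : Prop :=
  ∃ i < params.toList.length,
    params.toList[i]? = some '>' ∧
    (params.toList.take i).count '<' = (params.toList.take i).count '>'
instance (params : String) : Decidable (Pre_lex_params params) := by
  unfold Pre_lex_params; infer_instance

def pvWitness_lex_params : String := "class T, C<x> b> f()"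

def Spec_lex_params (params : String) (out : List String × String) : Prop := out = lex_params_alt params
instance (params : String) (out : List String × String) : Decidable (Spec_lex_params params out) := by unfold Spec_lex_params; infer_instance

-- ===== CLAIM (what is proved, stated in full; the proofs are below) =====
def Claim_equal_lex_params : Prop := ∀ (params : String), Dom_lex_params params → Pre_lex_params params → Spec_lex_params params (lex_params params)

-- ===== LEMMAS AND PROOFS =====

-- start index of the piece currently open after the recorded commas
def pvLastStart (h : Nat) (bs : List Nat) : Nat := bs.foldl (fun _ b => b + 1) h

theorem pvLastStart_cons (h b : Nat) (bs : List Nat) :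
    pvLastStart h (b :: bs) = pvLastStart (b + 1) bs := rfl

theorem pvLastStart_append (h t : Nat) (bs : List Nat) :
    pvLastStart h (bs ++ [t]) = t + 1 := by
  induction bs generalizing h with
  | nil => rfl
  | cons b bs ih => simpa [pvLastStart_cons] using ih (b + 1)

-- closing the open piece at boundary t (first list NOT extended)
theorem pv_zw_append (f : Nat → Nat → List Char) (h t : Nat) (bs : List Nat) :
    List.zipWith f (h :: bs.map (· + 1)) (bs ++ [t])
      = List.zipWith f (h :: bs.map (· + 1)) bs ++ [f (pvLastStart h bs) t] := by
  induction bs generalizing h with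
  | nil => simp [pvLastStart]
  | cons b bs ih =>
      simp only [List.map_cons, List.cons_append, List.zipWith_cons_cons, pvLastStart_cons]
      rw [ih (b + 1)]

-- recording a comma at t (both lists extended; zipWith drops the surplus start)
theorem pv_zw_record (f : Nat → Nat → List Char) (h t : Nat) (bs : List Nat) :
    List.zipWith f (h :: (bs ++ [t]).map (· + 1)) (bs ++ [t])
      = List.zipWith f (h :: bs.map (· + 1)) bs ++ [f (pvLastStart h bs) t] := by
  induction bs generalizing h with
  | nil => simp [pvLastStart]
  | cons b bs ih =>
      simp only [List.cons_append, List.map_cons, List.zipWith_cons_cons, pvLastStart_cons]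
      rw [ih (b + 1)]

theorem pvSliceNat_extend (cs : List Char) (s k : Nat) (c : Char)
    (hs : s ≤ k) (hk : cs[k]? = some c) :
    pvSliceNat cs s k ++ [c] = pvSliceNat cs s (k + 1) := by
  unfold pvSliceNat
  have h1 : k + 1 - s = (k - s) + 1 := by omega
  have h2 : (cs.drop s)[k - s]? = some c := by
    rw [List.getElem?_drop]
    simpa [Nat.add_sub_cancel' hs] using hk
  rw [h1, List.take_add_one, h2]
  rfl

-- one-step reductions of the two loops
theorem pv_stepA_gt (k : Nat) (l : List (Nat × Char)) (ret : List (List Char)) (cur : List Char) :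
    lexA_loop ((k, '>') :: l) ret cur 1 = some ((if cur ≠ [] then ret ++ [cur] else ret), k + 1) := by
  simp [lexA_loop]

theorem pv_stepA_comma (k : Nat) (l : List (Nat × Char)) (ret : List (List Char)) (cur : List Char) :
    lexA_loop ((k, ',') :: l) ret cur 1
      = lexA_loop l (if cur ≠ [] then ret ++ [cur] else ret) [] 1 := by
  simp [lexA_loop]

theorem pv_stepA_top (k : Nat) (c : Char) (l : List (Nat × Char)) (ret : List (List Char))
    (cur : List Char) (hgt : c ≠ '>') (hcm : c ≠ ',') :
    lexA_loop ((k, c) :: l) ret cur 1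
      = lexA_loop l ret (cur ++ [c]) (if c = '<' then 2 else 1) := by
  simp [lexA_loop, hgt, hcm]

theorem pv_stepA_deep (k : Nat) (c : Char) (l : List (Nat × Char)) (ret : List (List Char))
    (cur : List Char) (level : Int) (hl : level ≠ 1) :
    lexA_loop ((k, c) :: l) ret cur level
      = lexA_loop l ret (cur ++ [c])
          (if c = '<' then level + 1 else if c = '>' then level - 1 else level) := by
  simp [lexA_loop, hl]

theorem pv_stepB_gt (k : Nat) (l : List (Nat × Char)) (commas : List Nat) :
    lexB_loop ((k, '>') :: l) 1 commas = some (commas, k) := by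
  simp [lexB_loop]

theorem pv_stepB_comma (k : Nat) (l : List (Nat × Char)) (commas : List Nat) :
    lexB_loop ((k, ',') :: l) 1 commas = lexB_loop l 1 (commas ++ [k]) := by
  simp [lexB_loop]

theorem pv_stepB_top (k : Nat) (c : Char) (l : List (Nat × Char)) (commas : List Nat)
    (hgt : c ≠ '>') (hcm : c ≠ ',') :
    lexB_loop ((k, c) :: l) 1 commas = lexB_loop l (if c = '<' then 2 else 1) commas := by
  simp [lexB_loop, hgt, hcm]

theorem pv_stepB_deep (k : Nat) (c : Char) (l : List (Nat × Char)) (commas : List Nat)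
    (level : Int) (hl : level ≠ 1) :
    lexB_loop ((k, c) :: l) level commas
      = lexB_loop l (if c = '<' then level + 1 else if c = '>' then level - 1 else level) commas := by
  simp [lexB_loop, hl]

-- B's post-processing of a loop result, as A's loop would deliver it
def pvConv (cs : List Char) (p : List Nat × Nat) : List (List Char) × Nat :=
  ((List.zipWith (pvSliceNat cs) (0 :: p.1.map (· + 1)) (p.1 ++ [p.2])).filter (· ≠ []), p.2 + 1)

-- the simulation: A's accumulated state is determined by B's recorded boundaries
theorem pv_sim (cs : List Char) :
    ∀ (rest : List Char) (k : Nat) (commas : List Nat) (level : Int),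
      cs.drop k = rest →
      pvLastStart 0 commas ≤ k →
      lexA_loop (pvEnumFrom k rest)
        ((List.zipWith (pvSliceNat cs) (0 :: commas.map (· + 1)) commas).filter (· ≠ []))
        (pvSliceNat cs (pvLastStart 0 commas) k) level
      = (lexB_loop (pvEnumFrom k rest) level commas).map (pvConv cs) := by
  intro rest
  induction rest with
  | nil => intro k commas level _ _; simp [pvEnumFrom, lexA_loop, lexB_loop]
  | cons c rest ih =>
    intro k commas level hdrop hs
    have hk : cs[k]? = some c := by
      rw [← Nat.add_zero k, ← List.getElem?_drop, hdrop]; rfl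
    have hdrop' : cs.drop (k + 1) = rest := by
      have := congrArg (List.drop 1) hdrop
      simpa [List.drop_drop, Nat.add_comm] using this
    simp only [pvEnumFrom]
    by_cases hl : level = 1
    · subst hl
      by_cases hgt : c = '>'
      · subst hgt
        rw [pv_stepA_gt, pv_stepB_gt, Option.map_some]
        unfold pvConv
        rw [pv_zw_append, List.filter_append]
        by_cases hne : pvSliceNat cs (pvLastStart 0 commas) k = [] <;>
          simp [hne]
      · by_cases hcm : c = ','
        · subst hcm
          rw [pv_stepA_comma, pv_stepB_comma]
          have h1 : pvLastStart 0 (commas ++ [k]) = k + 1 := pvLastStart_append 0 k commas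
          have hrec := ih (k + 1) (commas ++ [k]) 1 hdrop' (by omega)
          rw [h1] at hrec
          rw [pv_zw_record] at hrec
          rw [List.filter_append] at hrec
          have h2 : pvSliceNat cs (k + 1) (k + 1) = [] := by
            simp [pvSliceNat]
          rw [h2] at hrec
          by_cases hne : pvSliceNat cs (pvLastStart 0 commas) k = [] <;>
            simpa [hne] using hrec
        · rw [pv_stepA_top k c _ _ _ hgt hcm, pv_stepB_top k c _ _ hgt hcm]
          rw [pvSliceNat_extend cs (pvLastStart 0 commas) k c hs hk]
          exact ih (k + 1) commas _ hdrop' (by omega)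
    · rw [pv_stepA_deep k c _ _ _ _ hl, pv_stepB_deep k c _ _ _ hl]
      rw [pvSliceNat_extend cs (pvLastStart 0 commas) k c hs hk]
      exact ih (k + 1) commas _ hdrop' (by omega)

theorem pv_eq_all (params : String) : lex_params params = lex_params_alt params := by
  have h := pv_sim params.toList params.toList 0 [] 1 (by simp) (by simp [pvLastStart])
  have e1 : pvSliceNat params.toList (pvLastStart 0 []) 0 = [] := rfl
  have e2 : (List.zipWith (pvSliceNat params.toList) (0 :: List.map (· + 1) []) []).filter
      (fun x => x ≠ []) = [] := rfl
  rw [e1, e2] at h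
  unfold lex_params lex_params_alt
  rw [h]
  cases hB : lexB_loop (pvEnumFrom 0 params.toList) 1 [] with
  | none => rfl
  | some p =>
      cases p with
      | mk commas e => simp [pvConv]

-- ===== VERDICT (by name: the statement is the Claim_ definition above) =====
theorem lex_params_spec : Claim_equal_lex_params := by
  intro params _ _
  unfold Spec_lex_params
  exact pv_eq_all params
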